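-- pv_equiv track=rewrite | github.com/AbhishekTungala/stackstage-ui | backend/utils/diagram_generator.py | _detect_architecture_pattern
-- ===== SOURCE A (Python) =====
-- from typing import Dict, List, Any, Optional, Tuple
--
-- def _detect_architecture_pattern(components: List[Dict]) -> str:
--     """Detect architecture pattern from components"""
--     component_types = [comp.get('type', '').lower() for comp in components]
--
--     # Check for serverless pattern
--     if any('lambda' in comp_type for comp_type in component_types):
--         return 'serverless'
--
--     # Check for microservices pattern
--     if len([comp for comp in component_types if 'service' in comp]) > 2:
--         return 'microservices'
--
--     # Check for data pipeline pattern
--     if any(keyword in ' '.join(component_types) for keyword in ['kinesis', 'glue', 'redshift', 'athena']):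
--         return 'data_pipeline'
--
--     # Default to multi-tier
--     return 'multi_tier'
-- ===== SOURCE B (Python) =====
-- from typing import Dict, List
--
-- # Table-driven rules engine: (pattern name, keywords, threshold), in priority order.
-- _RULES = [
--     ('serverless', ('lambda',), 1),
--     ('microservices', ('service',), 3),
--     ('data_pipeline', ('kinesis', 'glue', 'redshift', 'athena'), 1),
-- ]
--
--
-- def _detect_architecture_pattern(components: List[Dict]) -> str:
--     """Detect architecture pattern from components via a rule table and a tally dict."""
--     counts = {}
--     for comp in components:
--         t = comp.get('type', '').lower()
--         for name, kws, _ in _RULES: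
--             if any(kw in t for kw in kws):
--                 counts[name] = counts.get(name, 0) + 1
--     for name, _, threshold in _RULES:
--         if counts.get(name, 0) >= threshold:
--             return name
--     return 'multi_tier'
-- ===== Notes on version B (the rewrite author's own statement) =====
-- stated objective: alternative
-- what changed: Replaces A's hard-coded chain of three differently-shaped scans (any(), a filter-count, and a join-the-types-then-substring search) with a data-driven rules engine: a rule table (pattern, keywords, threshold), one tally pass that builds a per-pattern count dict, and a final threshold lookup over the table in priority order.
import Mathlib
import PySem

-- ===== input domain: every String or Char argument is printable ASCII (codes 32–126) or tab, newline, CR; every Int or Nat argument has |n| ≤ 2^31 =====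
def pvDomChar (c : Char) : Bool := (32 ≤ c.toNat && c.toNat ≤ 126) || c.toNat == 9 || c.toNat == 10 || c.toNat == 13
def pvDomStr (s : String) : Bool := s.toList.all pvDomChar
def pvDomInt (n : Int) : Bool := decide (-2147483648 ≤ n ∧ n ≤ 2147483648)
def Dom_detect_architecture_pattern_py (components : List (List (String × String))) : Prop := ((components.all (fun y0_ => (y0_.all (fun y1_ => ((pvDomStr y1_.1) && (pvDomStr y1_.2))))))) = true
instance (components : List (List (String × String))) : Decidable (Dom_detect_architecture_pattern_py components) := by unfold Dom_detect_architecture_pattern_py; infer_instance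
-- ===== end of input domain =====

-- B replaces A's hard-coded chain of three differently-shaped scans with a
-- data-driven rules engine: a rule table, one tally pass building a per-pattern
-- count dict, and a threshold lookup over the table (objective: alternative).

-- ===== PORT A =====
def detect_architecture_pattern_py (components : List (List (String × String))) : String :=
  let component_types := components.map (fun comp => PySem.Str.lower (PySem.Dict.getD (PySem.Dict.mk comp) "type" ""))
  if component_types.any (fun comp_type => PySem.Str.isIn "lambda" comp_type) then "serverless"
  else if (component_types.filter (fun comp => PySem.Str.isIn "service" comp)).length > 2 then "microservices"
  else if (["kinesis", "glue", "redshift", "athena"] : List String).any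
      (fun keyword => PySem.Str.isIn keyword (PySem.Str.join " " component_types)) then "data_pipeline"
  else "multi_tier"

-- ===== PORT B =====
-- the rule table: (pattern name, keywords, threshold), in priority order
def pvRules : List (String × List String × Int) :=
  [("serverless", (["lambda"], 1)),
   ("microservices", (["service"], 3)),
   ("data_pipeline", (["kinesis", "glue", "redshift", "athena"], 1))]

-- tally one component into the count dict (B's inner rule loop)
def pvTally (d : PySem.Dict String Int) (comp : List (String × String)) : PySem.Dict String Int :=
  let t := PySem.Str.lower (PySem.Dict.getD (PySem.Dict.mk comp) "type" "")
  pvRules.foldl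
    (fun d r => if r.2.1.any (fun kw => PySem.Str.isIn kw t) then d.insert r.1 (d.getD r.1 0 + 1) else d) d

def detect_architecture_pattern_py_alt (components : List (List (String × String))) : String :=
  let counts := components.foldl pvTally PySem.Dict.empty
  match pvRules.find? (fun r => counts.getD r.1 0 ≥ r.2.2) with
  | some r => r.1
  | none => "multi_tier"

-- ===== PRECONDITION & SPEC =====
def Spec_detect_architecture_pattern_py (components : List (List (String × String))) (out : String) : Prop := out = detect_architecture_pattern_py_alt components
instance (components : List (List (String × String))) (out : String) : Decidable (Spec_detect_architecture_pattern_py components out) := by unfold Spec_detect_architecture_pattern_py; infer_instance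

-- ===== CLAIM (what is proved, stated in full; the proofs are below) =====
def Claim_equal_detect_architecture_pattern_py : Prop := ∀ (components : List (List (String × String))), Dom_detect_architecture_pattern_py components → Spec_detect_architecture_pattern_py components (detect_architecture_pattern_py components)

-- ===== LEMMAS AND PROOFS =====

-- the lowercased type of one component
def pvTy (comp : List (String × String)) : String :=
  PySem.Str.lower (PySem.Dict.getD (PySem.Dict.mk comp) "type" "")

def pvMatch (kws : List String) (c : List (String × String)) : Bool :=
  kws.any (fun kw => PySem.Str.isIn kw (pvTy c))

def pvKwsP : List String := ["kinesis", "glue", "redshift", "athena"]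

lemma pvFoldTally (cs : List (List (String × String))) (d : PySem.Dict String Int) :
    ((cs.foldl pvTally d).getD "serverless" 0
        = d.getD "serverless" 0 + (cs.countP (pvMatch ["lambda"]) : Int))
    ∧ ((cs.foldl pvTally d).getD "microservices" 0
        = d.getD "microservices" 0 + (cs.countP (pvMatch ["service"]) : Int))
    ∧ ((cs.foldl pvTally d).getD "data_pipeline" 0
        = d.getD "data_pipeline" 0 + (cs.countP (pvMatch pvKwsP) : Int)) := by
  induction cs generalizing d with
  | nil => simp
  | cons c cs ih =>
    obtain ⟨i1, i2, i3⟩ := ih (pvTally d c)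
    simp only [List.foldl_cons, List.countP_cons, i1, i2, i3]
    refine ⟨?_, ?_, ?_⟩ <;>
    · simp only [pvTally, pvRules, List.foldl_cons, List.foldl_nil, pvMatch, pvTy, pvKwsP]
      split_ifs <;> simp [PySem.Dict.getD_insert] <;> ring

lemma pvInfix_split (kw a b : List Char) (c : Char) (hc : c ∉ kw) :
    kw <:+: (a ++ c :: b) ↔ kw <:+: a ∨ kw <:+: b := by
  constructor
  · rintro ⟨p, q, hpq⟩
    by_cases h1 : p.length + kw.length ≤ a.length
    · left
      have h := congrArg (List.take (p.length + kw.length)) hpq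
      rw [show p ++ kw ++ q = (p ++ kw) ++ q by simp, List.take_left' (by simp),
        List.take_append_of_le_length h1] at h
      exact ⟨p, a.drop (p.length + kw.length), by
        rw [show p ++ kw ++ a.drop (p.length + kw.length) = (p ++ kw) ++ a.drop (p.length + kw.length) by simp,
          h, List.take_append_drop]⟩
    · by_cases h2 : a.length + 1 ≤ p.length
      · right
        have h := congrArg (List.drop p.length) hpq
        rw [show p ++ kw ++ q = p ++ (kw ++ q) by simp, List.drop_left,
          show a ++ c :: b = (a ++ [c]) ++ b by simp, List.drop_append,
          List.drop_eq_nil_of_le (by simp; omega), List.nil_append] at h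
        exact ⟨b.take (p.length - (a ++ [c]).length), q, by
          rw [show b.take (p.length - (a ++ [c]).length) ++ kw ++ q
              = b.take (p.length - (a ++ [c]).length) ++ (kw ++ q) by simp,
            h, List.take_append_drop]⟩
      · exfalso
        apply hc
        have h := congrArg (fun l => l[a.length]?) hpq
        simp only at h
        rw [show p ++ kw ++ q = p ++ (kw ++ q) by simp] at h
        rw [List.getElem?_append_right (by omega)] at h
        rw [List.getElem?_append_left (by omega)] at h
        rw [List.getElem?_append_right (Nat.le_refl _)] at h
        simp only [Nat.sub_self, List.getElem?_cons_zero] at h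
        exact List.mem_of_getElem? h
  · rintro (⟨p, q, rfl⟩ | ⟨p, q, rfl⟩)
    · exact ⟨p, q ++ c :: b, by simp⟩
    · exact ⟨a ++ c :: p, q, by simp⟩

lemma pvInfix_intercalate (kw : List Char) (hne : kw ≠ []) (hc : ' ' ∉ kw) :
    ∀ ts : List (List Char), (kw <:+: [' '].intercalate ts ↔ ∃ t ∈ ts, kw <:+: t)
  | [] => by simpa [List.intercalate] using hne
  | [t] => by simp [List.intercalate, List.intersperse]
  | t :: t' :: ts => by
    rw [show [' '].intercalate (t :: t' :: ts) = t ++ ' ' :: [' '].intercalate (t' :: ts) by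
        simp [List.intercalate, List.intersperse],
      pvInfix_split kw _ _ _ hc, pvInfix_intercalate kw hne hc (t' :: ts)]
    simp

lemma pvIsIn_join (kw : String) (hne : kw.toList ≠ []) (hc : ' ' ∉ kw.toList) (ts : List String) :
    PySem.Str.isIn kw (PySem.Str.join " " ts) = ts.any (fun t => PySem.Str.isIn kw t) := by
  rw [Bool.eq_iff_iff]
  simp only [PySem.Str.isIn, PySem.Str.join, PySem.Chars.join, String.toList_ofList,
    PySem.Chars.isIn_iff_infix, List.any_eq_true]
  rw [show (" ".toList) = [' '] from rfl, pvInfix_intercalate kw.toList hne hc]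
  simp

-- A's third branch (search in the space-joined types) tests the same thing as
-- a per-component keyword match, since no keyword contains a space
lemma pvJoin_cond (components : List (List (String × String))) :
    ((["kinesis", "glue", "redshift", "athena"] : List String).any
      (fun keyword => PySem.Str.isIn keyword (PySem.Str.join " "
        (components.map (fun comp => PySem.Str.lower (PySem.Dict.getD (PySem.Dict.mk comp) "type" ""))))))
    = components.any (pvMatch pvKwsP) := by
  rw [Bool.eq_iff_iff]
  simp only [List.any_eq_true, List.mem_cons, List.not_mem_nil, or_false]
  constructor
  · rintro ⟨kw, hkw, hin⟩
    have : ∃ t ∈ components.map (fun comp => PySem.Str.lower (PySem.Dict.getD (PySem.Dict.mk comp) "type" "")), PySem.Str.isIn kw t = true := by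
      rw [← List.any_eq_true, ← pvIsIn_join kw (by rcases hkw with h|h|h|h <;> subst h <;> decide)
        (by rcases hkw with h|h|h|h <;> subst h <;> decide)]
      exact hin
    obtain ⟨t, ht, hkt⟩ := this
    obtain ⟨c, hcmem, rfl⟩ := List.mem_map.mp ht
    refine ⟨c, hcmem, ?_⟩
    simp only [pvMatch, pvKwsP, List.any_eq_true, List.mem_cons, List.not_mem_nil, or_false]
    exact ⟨kw, hkw, by simpa [pvTy] using hkt⟩
  · rintro ⟨c, hcmem, hm⟩
    simp only [pvMatch, pvKwsP, List.any_eq_true, List.mem_cons, List.not_mem_nil, or_false] at hm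
    obtain ⟨kw, hkw, hkt⟩ := hm
    refine ⟨kw, hkw, ?_⟩
    rw [pvIsIn_join kw (by rcases hkw with h|h|h|h <;> subst h <;> decide)
      (by rcases hkw with h|h|h|h <;> subst h <;> decide)]
    simp only [List.any_eq_true]
    exact ⟨pvTy c, List.mem_map.mpr ⟨c, hcmem, rfl⟩, hkt⟩

-- ===== VERDICT (by name: the statement is the Claim_ definition above) =====

theorem detect_architecture_pattern_py_spec : Claim_equal_detect_architecture_pattern_py := by
  intro components _
  show detect_architecture_pattern_py components = detect_architecture_pattern_py_alt components
  obtain ⟨h1, h2, h3⟩ := pvFoldTally components PySem.Dict.empty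
  unfold detect_architecture_pattern_py detect_architecture_pattern_py_alt
  simp only [pvRules, List.find?, h1, h2, h3, PySem.Dict.getD_empty]
  have e1 : ((components.map (fun comp => PySem.Str.lower (PySem.Dict.getD (PySem.Dict.mk comp) "type" ""))).any
      (fun comp_type => PySem.Str.isIn "lambda" comp_type))
      = components.any (pvMatch ["lambda"]) := by
    rw [List.any_map]
    apply congrArg; funext c
    simp [pvMatch, pvTy]
  have e2 : (((components.map (fun comp => PySem.Str.lower (PySem.Dict.getD (PySem.Dict.mk comp) "type" ""))).filter
      (fun comp => PySem.Str.isIn "service" comp)).length)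
      = components.countP (pvMatch ["service"]) := by
    rw [← List.countP_eq_length_filter, List.countP_map]
    have : ((fun comp => PySem.Str.isIn "service" comp) ∘ fun comp => PySem.Str.lower (PySem.Dict.getD (PySem.Dict.mk comp) "type" "")) = pvMatch ["service"] := by
      funext c
      simp [pvMatch, pvTy, Function.comp]
    rw [this]
  rw [e1, pvJoin_cond, e2]
  by_cases p1 : ∃ a ∈ components, pvMatch ["lambda"] a = true
  · simp [List.any_eq_true, p1]
  · by_cases p2 : 3 ≤ List.countP (pvMatch ["service"]) components
    · simp [List.any_eq_true, p1, p2, Nat.lt_iff_add_one_le]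
    · by_cases p3 : ∃ a ∈ components, pvMatch pvKwsP a = true
      · simp [List.any_eq_true, p1, p2, p3, Nat.lt_iff_add_one_le]
      · simp [List.any_eq_true, p1, p2, p3, Nat.lt_iff_add_one_le]
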